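-- pv_equiv track=rewrite | github.com/MrNevil/GFG-DSA | Hashing/Contest/XORPair.py | XORPair
-- ===== SOURCE A (Python) =====
-- def XORPair(arr,n,c):
--     result = 0
--     s = set()
--     for i in range(n):
--         if (c ^ arr[i]) in s:
--             result += 1
--         s.add(arr[i])
--     if result > 0:
--         return "Yes"
--     else:
--         return "No"
-- ===== SOURCE B (Python) =====
-- def XORPair(arr, n, c):
--     for i in range(n):
--         for j in range(i + 1, n):
--             if arr[i] ^ arr[j] == c:
--                 return "Yes"
--     return "No"
-- ===== Notes on version B (the rewrite author's own statement) =====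
-- stated objective: simpler
-- what changed: Replaced the set-of-seen-elements counting pass (build a set, count hits, compare the count to 0) by a direct nested i<j double loop that returns 'Yes' on the first pair with arr[i]^arr[j]==c, maintaining no auxiliary set or counter.
import Mathlib
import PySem

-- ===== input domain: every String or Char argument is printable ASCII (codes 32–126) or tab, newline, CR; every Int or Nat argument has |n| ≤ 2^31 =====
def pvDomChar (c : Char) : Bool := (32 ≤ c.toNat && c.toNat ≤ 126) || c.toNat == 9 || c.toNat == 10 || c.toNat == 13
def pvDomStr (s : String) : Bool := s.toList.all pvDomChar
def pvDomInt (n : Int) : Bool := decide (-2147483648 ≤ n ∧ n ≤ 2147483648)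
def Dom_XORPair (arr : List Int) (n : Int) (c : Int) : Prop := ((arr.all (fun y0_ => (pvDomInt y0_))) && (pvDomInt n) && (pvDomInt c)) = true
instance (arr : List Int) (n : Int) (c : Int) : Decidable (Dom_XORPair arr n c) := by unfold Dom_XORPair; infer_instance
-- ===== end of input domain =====

-- B replaces A's set-of-seen-elements counting pass by a nested i<j double loop
-- with an early return; simpler, no auxiliary set or counter (not faster).

-- ===== PORT A =====
-- literal transliteration: result counter + set of seen elements, then compare count to 0
def XORPair (arr : List Int) (n : Int) (c : Int) : String :=
  let st := (PySem.List.pyRange 0 n 1).foldl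
    (fun (p : Int × PySem.Set Int) i =>
      let a := PySem.List.pyGetD arr i 0
      (p.1 + (if PySem.Set.contains p.2 (PySem.Int.bxor c a) then 1 else 0),
       PySem.Set.add p.2 a))
    (0, PySem.Set.empty)
  if st.1 > 0 then "Yes" else "No"

-- ===== PORT B =====
-- literal transliteration of Source B: nested loops, first hit wins
def XORPair_alt (arr : List Int) (n : Int) (c : Int) : String :=
  if (PySem.List.pyRange 0 n 1).any (fun i =>
       (PySem.List.pyRange (i + 1) n 1).any (fun j =>
         PySem.Int.bxor (PySem.List.pyGetD arr i 0) (PySem.List.pyGetD arr j 0) == c))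
  then "Yes" else "No"

-- ===== PRECONDITION & SPEC =====
-- A raises IndexError when n exceeds len(arr) (arr[i] for i ≥ len(arr)); exclude exactly that.
def Pre_XORPair (arr : List Int) (n : Int) (c : Int) : Prop := n ≤ (arr.length : Int)
instance (arr : List Int) (n : Int) (c : Int) : Decidable (Pre_XORPair arr n c) := by unfold Pre_XORPair; infer_instance
def pvWitness_XORPair : List Int × Int × Int := ([1, 2, 3], 3, 3)

def Spec_XORPair (arr : List Int) (n : Int) (c : Int) (out : String) : Prop := out = XORPair_alt arr n c
instance (arr : List Int) (n : Int) (c : Int) (out : String) : Decidable (Spec_XORPair arr n c out) := by unfold Spec_XORPair; infer_instance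

-- ===== CLAIM (what is proved, stated in full; the proofs are below) =====
def Claim_equal_XORPair : Prop := ∀ (arr : List Int) (n : Int) (c : Int), Dom_XORPair arr n c → Pre_XORPair arr n c → Spec_XORPair arr n c (XORPair arr n c)

-- ===== LEMMAS AND PROOFS =====

-- Python ^ on ints is Int.xor (PySem.Int.bxor is the same function)
theorem pv_bxor_eq_xor (a b : Int) : PySem.Int.bxor a b = Int.xor a b := by
  unfold Int.xor
  rcases a with a | a <;> rcases b with b | b <;>
    simp [PySem.Int.bxor, Int.negSucc_eq] <;> omega

theorem pv_xor_cancel (a b : Int) : Int.xor (Int.xor a b) b = a := by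
  rcases a with a | a <;> rcases b with b | b <;> simp [Int.xor, Nat.xor_xor_cancel_right]

theorem pv_bxor_iff (c x a : Int) :
    x = PySem.Int.bxor c a ↔ PySem.Int.bxor x a = c := by
  simp only [pv_bxor_eq_xor]
  constructor
  · rintro rfl; exact pv_xor_cancel c a
  · rintro rfl; exact (pv_xor_cancel x a).symm

-- A's loop body over a fixed (arr, c)
def pvStep (arr : List Int) (c : Int) (p : Int × PySem.Set Int) (i : Int) : Int × PySem.Set Int :=
  let a := PySem.List.pyGetD arr i 0
  (p.1 + (if PySem.Set.contains p.2 (PySem.Int.bxor c a) then 1 else 0),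
   PySem.Set.add p.2 a)

def pvF (arr : List Int) (i : Int) : Int := PySem.List.pyGetD arr i 0

-- characterisation of A's counter: positive iff some index of L sees its xor-partner earlier
theorem pv_foldA_pos (arr : List Int) (c : Int) (L : List Int) (r : Int) (s : PySem.Set Int)
    (hr : 0 ≤ r) :
    0 < (L.foldl (pvStep arr c) (r, s)).1 ↔
      0 < r ∨ ∃ u a v, L = u ++ a :: v ∧
        PySem.Int.bxor c (pvF arr a) ∈ PySem.Set.update s (u.map (pvF arr)) := by
  induction L generalizing r s with
  | nil =>
    simp only [List.foldl_nil]
    constructor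
    · intro h; exact Or.inl h
    · rintro (h | ⟨u, a, v, h, _⟩)
      · exact h
      · exact absurd h (by simp)
  | cons x L ih =>
    have hstep : (x :: L).foldl (pvStep arr c) (r, s) =
        L.foldl (pvStep arr c)
          (r + (if PySem.Set.contains s (PySem.Int.bxor c (pvF arr x)) then 1 else 0),
           PySem.Set.add s (pvF arr x)) := by
      simp [pvStep, pvF]
    rw [hstep, ih _ _ (by split_ifs <;> omega)]
    constructor
    · rintro (h | ⟨u, a, v, hL, hmem⟩)
      · by_cases hc : PySem.Set.contains s (PySem.Int.bxor c (pvF arr x)) = true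
        · refine Or.inr ⟨[], x, L, rfl, ?_⟩
          simpa [PySem.Set.update_nil] using (PySem.Set.contains_iff s _).mp hc
        · simp only [hc, if_neg, Bool.false_eq_true, not_false_iff, add_zero] at h
          exact Or.inl h
      · refine Or.inr ⟨x :: u, a, v, by simp [hL], ?_⟩
        simpa [PySem.Set.update_cons] using hmem
    · rintro (h | ⟨u, a, v, hL, hmem⟩)
      · exact Or.inl (by split_ifs <;> omega)
      · cases u with
        | nil =>
          simp only [List.nil_append, List.cons.injEq] at hL
          obtain ⟨rfl, rfl⟩ := hL
          left
          have hcc : PySem.Set.contains s (PySem.Int.bxor c (pvF arr x)) = true := by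
            rw [PySem.Set.contains_iff]
            simpa [PySem.Set.update_nil] using hmem
          rw [if_pos hcc]
          omega
        | cons y u' =>
          simp only [List.cons_append, List.cons.injEq] at hL
          obtain ⟨rfl, hL⟩ := hL
          refine Or.inr ⟨u', a, v, hL, ?_⟩
          simpa [PySem.Set.update_cons] using hmem

-- a decomposition of pyRange 0 n 1 at element a has prefix pyRange 0 a 1
theorem pv_range_split (n : Int) (u v : List Int) (a : Int)
    (h : PySem.List.pyRange 0 n 1 = u ++ a :: v) :
    0 ≤ a ∧ a < n ∧ u = PySem.List.pyRange 0 a 1 := by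
  have ha : a ∈ PySem.List.pyRange 0 n 1 := by rw [h]; simp
  have hab := PySem.List.mem_pyRange_one.mp ha
  have hlen : u.length < (PySem.List.pyRange 0 n 1).length := by
    rw [h]; simp
  have hget : (PySem.List.pyRange 0 n 1)[u.length]'hlen = a := by
    simp [h]
  rw [PySem.List.getElem_pyRange_one] at hget
  have hua : (u.length : Int) = a := by omega
  refine ⟨hab.1, hab.2, ?_⟩
  have hsplit := PySem.List.pyRange_one_append 0 a n hab.1 (le_of_lt hab.2)
  have hlena : (PySem.List.pyRange 0 a 1).length = u.length := by
    rw [PySem.List.length_pyRange_one]; omega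
  have : u ++ a :: v = PySem.List.pyRange 0 a 1 ++ PySem.List.pyRange a n 1 := by
    rw [← h, hsplit]
  exact (List.append_inj_left this.symm hlena).symm

theorem pv_range_split_rev (n a : Int) (h0 : 0 ≤ a) (hn : a < n) :
    PySem.List.pyRange 0 n 1 = PySem.List.pyRange 0 a 1 ++ a :: PySem.List.pyRange (a + 1) n 1 := by
  rw [PySem.List.pyRange_one_append 0 a n h0 (le_of_lt hn), PySem.List.pyRange_one_cons hn]

-- ===== VERDICT (by name: the statement is the Claim_ definition above) =====
theorem XORPair_spec : Claim_equal_XORPair := by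
  intro arr n c _ _
  show XORPair arr n c = XORPair_alt arr n c
  unfold XORPair XORPair_alt
  have hbody : (fun (p : Int × PySem.Set Int) i =>
      let a := PySem.List.pyGetD arr i 0
      (p.1 + (if PySem.Set.contains p.2 (PySem.Int.bxor c a) then 1 else 0),
       PySem.Set.add p.2 a)) = pvStep arr c := rfl
  rw [hbody]
  have hA := pv_foldA_pos arr c (PySem.List.pyRange 0 n 1) 0 PySem.Set.empty le_rfl
  by_cases hpos :
      0 < ((PySem.List.pyRange 0 n 1).foldl (pvStep arr c) (0, PySem.Set.empty)).1
  · -- A says Yes; show B's any is true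
    obtain ⟨u, a, v, hL, hmem⟩ := (hA.mp hpos).resolve_left (by omega)
    obtain ⟨h0, hn, hu⟩ := pv_range_split n u v a hL
    rw [hu] at hmem
    have hmem' : PySem.Int.bxor c (pvF arr a) ∈ (PySem.List.pyRange 0 a 1).map (pvF arr) := by
      simpa [PySem.Set.mem_update, PySem.Set.empty] using hmem
    obtain ⟨j, hj, hjeq⟩ := List.mem_map.mp hmem'
    have hjr := PySem.List.mem_pyRange_one.mp hj
    have hany : (PySem.List.pyRange 0 n 1).any (fun i =>
        (PySem.List.pyRange (i + 1) n 1).any (fun j =>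
          PySem.Int.bxor (PySem.List.pyGetD arr i 0) (PySem.List.pyGetD arr j 0) == c)) = true := by
      rw [List.any_eq_true]
      refine ⟨j, PySem.List.mem_pyRange_one.mpr ⟨hjr.1, by omega⟩, ?_⟩
      rw [List.any_eq_true]
      refine ⟨a, PySem.List.mem_pyRange_one.mpr ⟨by omega, hn⟩, ?_⟩
      have : PySem.Int.bxor (pvF arr j) (pvF arr a) = c := (pv_bxor_iff c _ _).mp hjeq
      simpa [pvF] using this
    rw [if_pos hpos, if_pos hany]
  · -- A says No; show B's any is false
    have hnoA := hA.not.mp hpos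
    push Not at hnoA
    have hany : ¬ (PySem.List.pyRange 0 n 1).any (fun i =>
        (PySem.List.pyRange (i + 1) n 1).any (fun j =>
          PySem.Int.bxor (PySem.List.pyGetD arr i 0) (PySem.List.pyGetD arr j 0) == c)) = true := by
      rw [List.any_eq_true]
      rintro ⟨i, hi, hinner⟩
      rw [List.any_eq_true] at hinner
      obtain ⟨j, hj, heq⟩ := hinner
      have hir := PySem.List.mem_pyRange_one.mp hi
      have hjr := PySem.List.mem_pyRange_one.mp hj
      have heq' : PySem.Int.bxor (pvF arr i) (pvF arr j) = c := by
        simpa [pvF] using heq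
      have hmem : PySem.Int.bxor c (pvF arr j) ∈
          PySem.Set.update (PySem.Set.empty (α := Int)) ((PySem.List.pyRange 0 j 1).map (pvF arr)) := by
        rw [PySem.Set.mem_update]
        right
        rw [List.mem_map]
        exact ⟨i, PySem.List.mem_pyRange_one.mpr ⟨hir.1, by omega⟩,
          (pv_bxor_iff c (pvF arr i) (pvF arr j)).mpr heq'⟩
      exact hnoA.2 (PySem.List.pyRange 0 j 1) j (PySem.List.pyRange (j + 1) n 1)
        (pv_range_split_rev n j (by omega) hjr.2) hmem
    rw [if_neg hpos, if_neg hany]
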